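-- pv_equiv track=rewrite | github.com/JonathanCamiloDuarteGomez/Henry | M07_funciones/Prep_Course_Homework_07.py | seleccionPrimos
-- ===== SOURCE A (Python) =====
-- def primo(n):
--     aux=0
--     for i in range(n+1):
--         if(i!=0):
--             if n%i==0:
--                 if(i!=1):
--                     aux +=1
--     if aux!=1: return False
--     else: return True
--
-- def seleccionPrimos(nLista):
--     listaPrimos = []
--     for i in range(len(nLista)):
--         regreso = False
--         regreso = primo(nLista[i])
--         if regreso == True:
--             listaPrimos.append(i+1)
--     return listaPrimos
-- ===== SOURCE B (Python) =====
-- def seleccionPrimos(nLista):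
--     def es_primo(n):
--         if n < 2:
--             return False
--         d = 2
--         while d * d <= n:
--             if n % d == 0:
--                 return False
--             d += 1
--         return True
--     return [i for i, v in enumerate(nLista, 1) if es_primo(v)]
-- ===== Notes on version B (the rewrite author's own statement) =====
-- stated objective: faster
-- what changed: Replaces A's full divisor-counting pass over 1..n per element with an early-exit trial division up to sqrt(n) (while d*d<=n) and a 1-based enumerate comprehension instead of index loops.
import Mathlib
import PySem

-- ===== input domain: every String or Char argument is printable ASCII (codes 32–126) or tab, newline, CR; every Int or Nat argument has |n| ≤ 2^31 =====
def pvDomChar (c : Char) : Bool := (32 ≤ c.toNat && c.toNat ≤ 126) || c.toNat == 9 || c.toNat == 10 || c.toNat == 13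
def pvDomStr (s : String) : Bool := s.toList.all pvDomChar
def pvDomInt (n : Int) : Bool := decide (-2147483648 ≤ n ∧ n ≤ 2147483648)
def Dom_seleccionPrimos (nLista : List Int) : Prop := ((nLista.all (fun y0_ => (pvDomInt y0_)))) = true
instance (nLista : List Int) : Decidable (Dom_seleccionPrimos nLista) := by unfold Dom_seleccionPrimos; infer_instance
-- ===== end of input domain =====

-- B replaces A's full divisor-counting pass over 1..n per element with early-exit trial
-- division while d*d ≤ n, and a 1-based enumerate comprehension instead of an index loop.

-- ===== PORT A =====
def primo (n : Int) : Bool :=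
  let aux : Int := (PySem.List.pyRange 0 (n + 1) 1).foldl
    (fun aux i =>
      if i ≠ 0 then
        if PySem.Int.mod n i = 0 then
          if i ≠ 1 then aux + 1 else aux
        else aux
      else aux) 0
  if aux ≠ 1 then false else true

def seleccionPrimos (nLista : List Int) : List Int :=
  (PySem.List.pyRange 0 (nLista.length : Int) 1).foldl
    (fun listaPrimos i =>
      let regreso := primo (PySem.List.pyGetD nLista i 0)
      if regreso == true then listaPrimos ++ [i + 1] else listaPrimos) []

-- ===== PORT B =====
-- termination helper for the while-loop port (d*d ≤ n forces d ≤ n)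
theorem pvSqLe {n d : Int} (h : d * d ≤ n) : d ≤ n := by nlinarith [sq_nonneg d]

def esPrimoAux (n d : Int) : Bool :=
  if h : d * d ≤ n then
    if PySem.Int.mod n d = 0 then false else esPrimoAux n (d + 1)
  else true
termination_by (n + 1 - d).toNat
decreasing_by have := pvSqLe h; omega

def esPrimo (n : Int) : Bool :=
  if n < 2 then false else esPrimoAux n 2

def seleccionPrimos_alt (nLista : List Int) : List Int :=
  ((PySem.List.enumerate nLista 1).filter (fun p => esPrimo p.2)).map (fun p => p.1)

-- ===== PRECONDITION & SPEC =====
def Spec_seleccionPrimos (nLista : List Int) (out : List Int) : Prop := out = seleccionPrimos_alt nLista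
instance (nLista : List Int) (out : List Int) : Decidable (Spec_seleccionPrimos nLista out) := by unfold Spec_seleccionPrimos; infer_instance

-- ===== CLAIM (what is proved, stated in full; the proofs are below) =====
def Claim_equal_seleccionPrimos : Prop := ∀ (nLista : List Int), Dom_seleccionPrimos nLista → Spec_seleccionPrimos nLista (seleccionPrimos nLista)

-- ===== LEMMAS AND PROOFS =====

-- A's divisor loop is a countP over range(n+1)
theorem primo_aux_count (n : Int) :
    primo n = decide ((((PySem.List.pyRange 0 (n + 1) 1).countP
      (fun i => decide (i ≠ 0 ∧ PySem.Int.mod n i = 0 ∧ i ≠ 1)) : Nat) : Int) = 1) := by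
  have hfold : (PySem.List.pyRange 0 (n + 1) 1).foldl
      (fun aux i =>
        if i ≠ 0 then
          if PySem.Int.mod n i = 0 then
            if i ≠ 1 then aux + 1 else aux
          else aux
        else aux) (0 : Int)
      = (((PySem.List.pyRange 0 (n + 1) 1).countP
          (fun i => decide (i ≠ 0 ∧ PySem.Int.mod n i = 0 ∧ i ≠ 1)) : Nat) : Int) := by
    rw [PySem.List.foldl_congr_mem _ _
      (fun aux i => if (i ≠ 0 ∧ PySem.Int.mod n i = 0 ∧ i ≠ 1) then aux + 1 else aux) _
      (by intro acc i _
          by_cases h0 : i = 0 <;> by_cases hm : PySem.Int.mod n i = 0 <;>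
            by_cases h1 : i = 1 <;> simp [h0, hm, h1])]
    rw [PySem.List.foldl_ite_add_one]
    simp
  simp only [primo, hfold]
  split_ifs with h
  · rw [eq_comm, decide_eq_false_iff_not]
    exact h
  · rw [eq_comm, decide_eq_true_iff]
    omega

-- A's primo is trial division over 2..n-1
theorem primo_iff (n : Int) (hn : 2 ≤ n) :
    primo n = true ↔ ∀ i : Int, 2 ≤ i → i < n → ¬ i ∣ n := by
  rw [primo_aux_count, decide_eq_true_iff]
  have hsplit : PySem.List.pyRange 0 (n + 1) 1
      = PySem.List.pyRange 0 2 1 ++ (PySem.List.pyRange 2 n 1 ++ PySem.List.pyRange n (n + 1) 1) := by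
    rw [← PySem.List.pyRange_one_append 2 n (n + 1) (by omega) (by omega),
        ← PySem.List.pyRange_one_append 0 2 (n + 1) (by omega) (by omega)]
  rw [hsplit]
  have h02 : PySem.List.pyRange 0 2 1 = [0, 1] := by decide
  have hn1 : PySem.List.pyRange n (n + 1) 1 = [n] := PySem.List.pyRange_one_singleton n
  rw [h02, hn1, List.countP_append, List.countP_append]
  have hc0 : List.countP (fun i => decide (i ≠ 0 ∧ PySem.Int.mod n i = 0 ∧ i ≠ 1)) [0, 1] = 0 := by
    rw [List.countP_cons_of_neg (by simp), List.countP_cons_of_neg (by simp), List.countP_nil]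
  have hcn : List.countP (fun i => decide (i ≠ 0 ∧ PySem.Int.mod n i = 0 ∧ i ≠ 1)) [n] = 1 := by
    rw [List.countP_singleton, if_pos]
    simp only [decide_eq_true_iff]
    exact ⟨by omega, (PySem.Int.mod_eq_zero_iff_dvd n n).mpr dvd_rfl, by omega⟩
  rw [hc0, hcn]
  have hcast : ∀ c : Nat, ((0 + (c + 1) : Nat) : Int) = 1 ↔ c = 0 := by intro c; omega
  rw [hcast, List.countP_eq_zero]
  constructor
  · intro h i h2 hin hdvd
    have hm : i ∈ PySem.List.pyRange 2 n 1 := by rw [PySem.List.mem_pyRange_one]; omega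
    have hni := h i hm
    rw [decide_eq_true_iff] at hni
    exact hni ⟨by omega, (PySem.Int.mod_eq_zero_iff_dvd n i).mpr hdvd, by omega⟩
  · intro h i hi
    rw [PySem.List.mem_pyRange_one] at hi
    rw [decide_eq_true_iff]
    rintro ⟨h0, hmod, h1⟩
    exact h i (by omega) (by omega) ((PySem.Int.mod_eq_zero_iff_dvd n i).mp hmod)

-- B's loop tests every divisor from d up to sqrt n
theorem esPrimoAux_iff (n d : Int) (hd : 0 ≤ d) :
    esPrimoAux n d = true ↔ ∀ m : Int, d ≤ m → m * m ≤ n → ¬ m ∣ n := by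
  revert hd
  fun_induction esPrimoAux n d with
  | case1 d h hmod =>
    intro hd
    constructor
    · intro hfalse; exact absurd hfalse (by simp)
    · intro hall
      exact absurd ((PySem.Int.mod_eq_zero_iff_dvd n d).mp hmod) (hall d le_rfl h)
  | case2 d h hmod ih =>
    intro hd
    rw [ih (by omega)]
    constructor
    · intro hall m hm hmm
      rcases eq_or_lt_of_le hm with heq | hlt
      · subst heq
        intro hdvd
        exact hmod ((PySem.Int.mod_eq_zero_iff_dvd _ _).mpr hdvd)
      · exact hall m (by omega) hmm
    · intro hall m hm hmm
      exact hall m (by omega) hmm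
  | case3 d h =>
    intro hd
    simp only [true_iff]
    intro m hm hmm
    exact absurd hmm (by nlinarith)

-- a divisor below n exists iff one below sqrt n does
theorem trial_iff_sqrt (n : Int) (hn : 2 ≤ n) :
    (∀ i : Int, 2 ≤ i → i < n → ¬ i ∣ n) ↔ (∀ d : Int, 2 ≤ d → d * d ≤ n → ¬ d ∣ n) := by
  constructor
  · intro h d h2 hdd hdvd
    exact h d h2 (by nlinarith) hdvd
  · intro h i h2 hin hdvd
    obtain ⟨e, he⟩ := hdvd
    have he2 : 2 ≤ e := by
      have he0 : 1 ≤ e := by nlinarith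
      have hne : e ≠ 1 := by intro h1; rw [h1, mul_one] at he; omega
      omega
    by_cases hc : i * i ≤ n
    · exact h i h2 hc ⟨e, he⟩
    · have hei : e ≤ i := by nlinarith
      have hee : e * e ≤ n := by nlinarith
      exact h e he2 hee ⟨i, by linarith [he]⟩

theorem primo_eq_esPrimo (n : Int) : primo n = esPrimo n := by
  by_cases hn : n < 2
  · have hc : (PySem.List.pyRange 0 (n + 1) 1).countP
        (fun i => decide (i ≠ 0 ∧ PySem.Int.mod n i = 0 ∧ i ≠ 1)) = 0 := by
      rw [List.countP_eq_zero]
      intro i hi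
      rw [PySem.List.mem_pyRange_one] at hi
      rw [Bool.not_eq_true, decide_eq_false_iff_not]
      rintro ⟨h0, hmod, h1⟩
      omega
    rw [primo_aux_count, hc, esPrimo, if_pos hn]
    simp
  · have hn2 : 2 ≤ n := by omega
    rw [esPrimo, if_neg hn, Bool.eq_iff_iff, primo_iff n hn2,
      esPrimoAux_iff n 2 (by omega)]
    exact trial_iff_sqrt n hn2

-- enumerate(xs, s) as an indexed range
theorem enumerate_eq_range (xs : List Int) (s : Int) :
    PySem.List.enumerate xs s
      = (List.range xs.length).map (fun (k : Nat) => (s + (k : Int), xs.getD k 0)) := by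
  induction xs generalizing s with
  | nil => simp [PySem.List.enumerate_nil]
  | cons x xs ih =>
    rw [PySem.List.enumerate_cons, ih, List.length_cons, List.range_succ_eq_map,
      List.map_cons, List.map_map]
    congr 1
    · simp
    · apply List.map_congr_left
      intro k _
      simp only [Function.comp, Nat.succ_eq_add_one, List.getD_cons_succ, Prod.mk.injEq]
      constructor
      · push_cast; ring
      · trivial

theorem selection_eq (xs : List Int) : seleccionPrimos xs = seleccionPrimos_alt xs := by
  have hA : seleccionPrimos xs
      = ((List.range xs.length).filter (fun k => esPrimo (xs[k]?.getD 0))).map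
          (fun (k : Nat) => (k : Int) + 1) := by
    unfold seleccionPrimos
    rw [PySem.List.foldl_congr_mem _ _
      (fun acc i => if esPrimo (PySem.List.pyGetD xs i 0) = true then acc ++ [i + 1] else acc) _
      (by intro acc i _
          simp [primo_eq_esPrimo])]
    rw [PySem.List.foldl_append_if (fun i => esPrimo (PySem.List.pyGetD xs i 0)) (fun i => i + 1)]
    rw [PySem.List.pyRange_zero_nat xs.length, List.filter_map, List.map_map]
    simp [Function.comp_def, List.getD]
  have hB : seleccionPrimos_alt xs
      = ((List.range xs.length).filter (fun k => esPrimo (xs[k]?.getD 0))).map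
          (fun (k : Nat) => 1 + (k : Int)) := by
    unfold seleccionPrimos_alt
    rw [enumerate_eq_range, List.filter_map, List.map_map]
    simp [Function.comp_def, List.getD]
  rw [hA, hB]
  apply List.map_congr_left
  intro k _
  omega

-- ===== VERDICT (by name: the statement is the Claim_ definition above) =====
theorem seleccionPrimos_spec : Claim_equal_seleccionPrimos := by
  intro nLista _
  unfold Spec_seleccionPrimos
  exact selection_eq nLista
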